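-- pv_equiv track=rewrite | github.com/foxxpy/Algorithmie | 043. Tester si tous les mots d'une chaîne de caractères commencent par une majuscule/is_title.py | is_title
-- ===== SOURCE A (Python) =====
-- def is_title(text):
--     """Renvoie True si tous les mots de text commencent par une majuscule"""
--     text_is_title = True
--     must_be_uppercase = True
--     punctuation = [".", " ", ";", ":", "!", "?", ".", "/", "§", "-", "_", "'", '"',
--                    "1", "2", "3", "4", "5", "6", "7", "8", "9"]
--
--     for char in text:
--         if must_be_uppercase and not 64 < ord(char) < 91 and not char in punctuation:
--             text_is_title = False
--             break
--
--         elif not must_be_uppercase and 64 < ord(char) < 91: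
--             text_is_title = False
--             break
--
--         #Si on vient de rencontrer une ponctuation, la lettre suivante doit être une lettre majuscule
--         if char in punctuation:
--             must_be_uppercase = True
--
--         #Sinon c'est qu'on vient de rencontrer une lettre, et donc les autres lettres doivent être en minuscule
--         else:
--             must_be_uppercase = False
--
--     return text_is_title
-- ===== SOURCE B (Python) =====
-- SEPARATORS = set(". ;:!?/\u00a7-_'\"123456789")
--
-- def is_title(text):
--     """Renvoie True si tous les mots de text commencent par une majuscule"""
--     # Phase 1: split into maximal runs of non-separator characters.
--     words = []
--     current = ""
--     for char in text:
--         if char in SEPARATORS: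
--             words.append(current)
--             current = ""
--         else:
--             current += char
--     words.append(current)
--     # Phase 2: each non-empty word: first char in ord range 65..90, rest outside it.
--     for word in words:
--         if word:
--             if not 64 < ord(word[0]) < 91:
--                 return False
--             if any(64 < ord(c) < 91 for c in word[1:]):
--                 return False
--     return True
-- ===== Notes on version B (the rewrite author's own statement) =====
-- stated objective: alternative
-- what changed: Replaces A's one-pass state machine (must_be_uppercase flag with early break) by a two-phase split-then-check: first split the text into maximal runs between the exact separator set, then validate each word (first char in ord 65..90, rest outside it).
import Mathlib
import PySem

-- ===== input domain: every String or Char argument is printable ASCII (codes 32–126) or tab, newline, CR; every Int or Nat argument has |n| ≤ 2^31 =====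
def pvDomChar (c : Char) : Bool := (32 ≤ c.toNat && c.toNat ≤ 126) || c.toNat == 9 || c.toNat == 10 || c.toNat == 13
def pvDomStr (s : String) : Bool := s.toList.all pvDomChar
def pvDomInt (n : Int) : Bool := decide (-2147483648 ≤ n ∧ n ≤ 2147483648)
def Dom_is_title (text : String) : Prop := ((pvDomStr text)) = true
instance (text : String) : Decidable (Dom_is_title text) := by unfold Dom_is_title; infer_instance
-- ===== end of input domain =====

-- B replaces A's one-pass must_be_uppercase state machine by a split-into-words
-- phase followed by a per-word check; same behaviour, different decomposition.


-- ===== PORT A =====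
-- A's punctuation list, duplicate '.' included, verbatim
def pyPunct : List Char := ['.', ' ', ';', ':', '!', '?', '.', '/', '§', '-', '_', '\'', '"',
                            '1', '2', '3', '4', '5', '6', '7', '8', '9']

def isTitleLoop : List Char → Bool → Bool
  | [], _ => true
  | c :: rest, mub =>
    if mub && !(decide (64 < c.toNat) && decide (c.toNat < 91)) && !(pyPunct.contains c) then
      false
    else if !mub && (decide (64 < c.toNat) && decide (c.toNat < 91)) then
      false
    else
      isTitleLoop rest (if pyPunct.contains c then true else false)

def is_title (text : String) : Bool := isTitleLoop text.toList true

-- ===== PORT B =====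
def sepB : List Char := ['.', ' ', ';', ':', '!', '?', '/', '§', '-', '_', '\'', '"',
                         '1', '2', '3', '4', '5', '6', '7', '8', '9']

def upB (c : Char) : Bool := decide (64 < c.toNat) && decide (c.toNat < 91)

def splitW : List Char → List Char → List (List Char)
  | [], cur => [cur]
  | c :: rest, cur =>
    if sepB.contains c then cur :: splitW rest [] else splitW rest (cur ++ [c])

def checkWord : List Char → Bool
  | [] => true
  | c :: rest => upB c && rest.all (fun d => !upB d)

def is_title_alt (text : String) : Bool := (splitW text.toList []).all checkWord

-- ===== PRECONDITION & SPEC =====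
def Spec_is_title (text : String) (out : Bool) : Prop := out = is_title_alt text
instance (text : String) (out : Bool) : Decidable (Spec_is_title text out) := by unfold Spec_is_title; infer_instance

-- ===== CLAIM (what is proved, stated in full; the proofs are below) =====
def Claim_equal_is_title : Prop := ∀ (text : String), Dom_is_title text → Spec_is_title text (is_title text)

-- ===== LEMMAS AND PROOFS =====

-- A's member test and B's agree (A's list has a duplicate '.')
lemma contains_eq (c : Char) : pyPunct.contains c = sepB.contains c := by
  cases h : decide (c = '.') <;>
    simp [pyPunct, sepB, List.contains_eq_mem, h]

-- no separator character is in the uppercase ord range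
lemma sep_not_up (c : Char) (h : sepB.contains c = true) : upB c = false := by
  simp [sepB, List.contains_eq_mem] at h
  rcases h with h|h|h|h|h|h|h|h|h|h|h|h|h|h|h|h|h|h|h|h|h <;> subst h <;> decide

-- a word whose accumulated prefix is already doomed fails whatever follows
lemma fail_all (rest : List Char) : ∀ cur, (∀ ext, checkWord (cur ++ ext) = false) →
    (splitW rest cur).all checkWord = false := by
  induction rest with
  | nil =>
      intro cur h
      have h0 := h []
      rw [List.append_nil] at h0
      simp only [splitW, List.all_cons, List.all_nil, h0, Bool.false_and]
  | cons c rest ih =>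
      intro cur h
      have h0 := h []
      rw [List.append_nil] at h0
      by_cases hs : sepB.contains c = true
      · simp only [splitW, hs, if_true, List.all_cons, h0, Bool.false_and]
      · rw [splitW, if_neg hs]
        exact ih (cur ++ [c]) (fun ext => by
          rw [List.append_assoc]; exact h ([c] ++ ext))

-- the state machine equals the split-then-check scan, under the loop invariant:
-- mub = true  ↔ the current accumulated word is empty,
-- mub = false ↔ the accumulated word is nonempty and valid so far
lemma loop_eq (chars : List Char) : ∀ (mub : Bool) (cur : List Char),
    (mub = true → cur = []) →
    (mub = false → ∃ c0 cs, cur = c0 :: cs ∧ upB c0 = true ∧ cs.all (fun d => !upB d) = true) →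
    isTitleLoop chars mub = (splitW chars cur).all checkWord := by
  induction chars with
  | nil =>
      intro mub cur ht hf
      cases mub with
      | true =>
          have hc := ht rfl; subst hc
          simp [isTitleLoop, splitW, checkWord]
      | false =>
          obtain ⟨c0, cs, rfl, h1, h2⟩ := hf rfl
          simp [isTitleLoop, splitW, checkWord, h1, h2]
  | cons c rest ih =>
      intro mub cur ht hf
      by_cases hs : sepB.contains c = true
      · -- separator: both sides close the current word and restart
        have hp : c ∈ pyPunct := by
          have h2 : pyPunct.contains c = true := by rw [contains_eq]; exact hs
          simpa [List.contains_iff_mem] using h2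
        have hu : upB c = false := sep_not_up c hs
        have hu' : (decide (64 < c.toNat) && decide (c.toNat < 91)) = false := hu
        have hL : isTitleLoop (c :: rest) mub = isTitleLoop rest true := by
          cases mub <;> simp [isTitleLoop, hp, hu']
        have hcw : checkWord cur = true := by
          cases mub with
          | true => have hc := ht rfl; subst hc; rfl
          | false =>
              obtain ⟨c0, cs, rfl, h1, h2⟩ := hf rfl
              simp [checkWord, h1, h2]
        rw [hL, splitW, if_pos hs, List.all_cons, hcw, Bool.true_and]
        exact ih true [] (fun _ => rfl) (by simp)
      · have hp : c ∉ pyPunct := by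
          have h2 : pyPunct.contains c = false := by rw [contains_eq]; simpa using hs
          simpa [List.contains_iff_mem] using h2
        by_cases hu : upB c = true
        · -- uppercase non-separator
          have hu' : (decide (64 < c.toNat) && decide (c.toNat < 91)) = true := hu
          cases mub with
          | true =>
              have hc := ht rfl; subst hc
              have hL : isTitleLoop (c :: rest) true = isTitleLoop rest false := by
                simp [isTitleLoop, hp, hu']
              rw [hL, splitW, if_neg hs, List.nil_append]
              exact ih false [c] (by simp) (fun _ => ⟨c, [], rfl, hu, by simp⟩)
          | false =>
              -- A breaks; B's current word gets an inner uppercase and is doomed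
              obtain ⟨c0, cs, rfl, h1, h2⟩ := hf rfl
              have hL : isTitleLoop (c :: rest) false = false := by
                simp [isTitleLoop, hp, hu']
              rw [hL, splitW, if_neg hs]
              refine Eq.symm ?_
              apply fail_all
              intro ext
              simp [checkWord, List.all_append, hu]
        · have huf : upB c = false := by simpa using hu
          have hu' : (decide (64 < c.toNat) && decide (c.toNat < 91)) = false := huf
          cases mub with
          | true =>
              -- A breaks; B's new word starts with a non-uppercase char and is doomed
              have hc := ht rfl; subst hc
              have hL : isTitleLoop (c :: rest) true = false := by
                simp [isTitleLoop, hp, hu']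
              rw [hL, splitW, if_neg hs, List.nil_append]
              refine Eq.symm ?_
              apply fail_all
              intro ext
              simp [checkWord, huf]
          | false =>
              obtain ⟨c0, cs, rfl, h1, h2⟩ := hf rfl
              have hL : isTitleLoop (c :: rest) false = isTitleLoop rest false := by
                simp [isTitleLoop, hp, hu']
              rw [hL, splitW, if_neg hs]
              exact ih false ((c0 :: cs) ++ [c]) (by simp)
                (fun _ => ⟨c0, cs ++ [c], by simp, h1, by simp [List.all_append, h2, huf]⟩)

-- ===== VERDICT (by name: the statement is the Claim_ definition above) =====
theorem is_title_spec : Claim_equal_is_title := by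
  intro text _
  unfold Spec_is_title is_title is_title_alt
  exact loop_eq text.toList true [] (fun _ => rfl) (by simp)
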